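-- pv_equiv track=rewrite | github.com/terngkub/docker-1 | 02_bonus/python/npuzzle/heuristic.py | get_conflict
-- ===== SOURCE A (Python) =====
-- def get_conflict(puzzle, goal, size):
--     count = [0] * size
--     conflict = []
--     for i in range(size):
--         conflict.append([])
--     for j in range(1, size):
--         if puzzle[j] == 0 or puzzle[j] not in goal:
--             continue
--         for k in range(j):
--             if puzzle[k] == 0 or puzzle[k] not in goal:
--                 continue
--             if goal.index(puzzle[j]) >= goal.index(puzzle[k]):
--                 continue
--             count[j] += 1
--             count[k] += 1
--             conflict[j].append(k)
--             conflict[k].append(j)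
--     return (count, conflict)
-- ===== SOURCE B (Python) =====
-- def get_conflict(puzzle, goal, size):
--     # Per-index scan: for each board position i, collect (ascending) every
--     # other position m whose board order is strictly opposite to the goal
--     # order of the two tiles; conflict counts are just the row lengths.
--     n = max(size, 0)
--
--     def gindex(i):
--         v = puzzle[i]
--         if v == 0 or v not in goal:
--             return None
--         return goal.index(v)
--
--     conflict = []
--     for i in range(n):
--         gi = gindex(i)
--         if gi is None:
--             conflict.append([])
--         else:
--             conflict.append([m for m in range(n)
--                              if (gm := gindex(m)) is not None
--                              and ((m < i and gi < gm) or (i < m and gm < gi))])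
--     count = [len(row) for row in conflict]
--     return (count, conflict)
-- ===== Notes on version B (the rewrite author's own statement) =====
-- stated objective: simpler
-- what changed: Replaces A's triangular pair loop with symmetric double updates into preallocated count/conflict arrays by an independent per-index scan that builds each conflict row directly as a comprehension (counts are just row lengths).
-- outside the precondition, e.g. on get_conflict([], [], 1): A returns ([0], [[]]), B raises IndexError
import Mathlib
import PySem

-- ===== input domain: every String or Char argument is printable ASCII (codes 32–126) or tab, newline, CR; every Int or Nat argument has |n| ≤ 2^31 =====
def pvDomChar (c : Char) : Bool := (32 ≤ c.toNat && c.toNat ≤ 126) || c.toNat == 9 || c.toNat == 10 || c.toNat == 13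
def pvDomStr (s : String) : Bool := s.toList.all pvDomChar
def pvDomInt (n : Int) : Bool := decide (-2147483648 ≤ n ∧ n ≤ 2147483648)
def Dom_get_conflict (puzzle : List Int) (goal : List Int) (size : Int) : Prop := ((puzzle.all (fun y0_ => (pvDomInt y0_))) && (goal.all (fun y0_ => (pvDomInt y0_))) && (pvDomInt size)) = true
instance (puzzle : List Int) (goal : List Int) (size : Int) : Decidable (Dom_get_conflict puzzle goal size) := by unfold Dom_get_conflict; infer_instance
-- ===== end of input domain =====

-- B replaces A's triangular pair loop (symmetric double updates) by an independent
-- per-index scan building each conflict row directly; objective: simpler.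

-- ===== PORT A =====
-- literal transliteration of A's nested loops; the 'none' branches of pyGet? are
-- IndexError in Python and are excluded by Pre_get_conflict.
def get_conflict (puzzle : List Int) (goal : List Int) (size : Int) : List Int × List (List Int) :=
  let count : List Int := List.replicate size.toNat 0
  let conflict : List (List Int) :=
    (PySem.List.pyRange 0 size 1).foldl (fun c _ => c ++ [([] : List Int)]) []
  (PySem.List.pyRange 1 size 1).foldl (fun st j =>
    match PySem.List.pyGet? puzzle j with
    | none => st
    | some pj =>
      if pj = 0 ∨ goal.contains pj = false then st
      else
        (PySem.List.pyRange 0 j 1).foldl (fun st k =>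
          match PySem.List.pyGet? puzzle k with
          | none => st
          | some pk =>
            if pk = 0 ∨ goal.contains pk = false then st
            else if ((PySem.List.index? goal pj).getD 0) ≥ ((PySem.List.index? goal pk).getD 0) then st
            else
              let count1 := PySem.List.pySetD st.1 j (PySem.List.pyGetD st.1 j 0 + 1)
              let count2 := PySem.List.pySetD count1 k (PySem.List.pyGetD count1 k 0 + 1)
              let conf1 := PySem.List.pySetD st.2 j (PySem.List.pyGetD st.2 j [] ++ [k])
              let conf2 := PySem.List.pySetD conf1 k (PySem.List.pyGetD conf1 k [] ++ [j])
              (count2, conf2)) st) (count, conflict)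

-- ===== PORT B =====
-- gindex(i) of Source B: goal index of puzzle[i], none for the blank / a tile not in goal
-- (the pyGet? 'none' case is Python's IndexError, excluded by Pre_get_conflict).
def pvGB (puzzle : List Int) (goal : List Int) (i : Int) : Option Nat :=
  match PySem.List.pyGet? puzzle i with
  | none => none
  | some v =>
    if v = 0 ∨ goal.contains v = false then none
    else (PySem.List.index? goal v)

def get_conflict_alt (puzzle : List Int) (goal : List Int) (size : Int) : List Int × List (List Int) :=
  let n := (max size 0).toNat
  let conflict : List (List Int) :=
    (List.range n).map (fun i : Nat =>
      match pvGB puzzle goal (i : Int) with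
      | none => ([] : List Int)
      | some gi =>
        ((List.range n).filter (fun m : Nat =>
          match pvGB puzzle goal (m : Int) with
          | none => false
          | some gm => decide ((m < i ∧ gi < gm) ∨ (i < m ∧ gm < gi)))).map
          (fun m : Nat => (m : Int)))
  let count : List Int := conflict.map (fun row => (row.length : Int))
  (count, conflict)

-- ===== PRECONDITION & SPEC =====
-- Pre_ excludes 0 < size > len(puzzle): there Python A raises IndexError except for
-- the single shape size = 1 with an empty puzzle (A's pair loop never indexes and it
-- returns ([0], [[]])), where B's per-index scan indexes puzzle and raises IndexError.
def Pre_get_conflict (puzzle : List Int) (goal : List Int) (size : Int) : Prop :=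
  size ≤ 0 ∨ size ≤ (puzzle.length : Int)
instance (puzzle : List Int) (goal : List Int) (size : Int) : Decidable (Pre_get_conflict puzzle goal size) := by unfold Pre_get_conflict; infer_instance
def pvWitness_get_conflict : List Int × List Int × Int := ([3, 1, 2, 0], [1, 2, 3, 0], 4)

def Spec_get_conflict (puzzle : List Int) (goal : List Int) (size : Int) (out : List Int × List (List Int)) : Prop := out = get_conflict_alt puzzle goal size
instance (puzzle : List Int) (goal : List Int) (size : Int) (out : List Int × List (List Int)) : Decidable (Spec_get_conflict puzzle goal size out) := by unfold Spec_get_conflict; infer_instance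

-- ===== CLAIM (what is proved, stated in full; the proofs are below) =====
def Claim_equal_get_conflict : Prop := ∀ (puzzle : List Int) (goal : List Int) (size : Int), Dom_get_conflict puzzle goal size → Pre_get_conflict puzzle goal size → Spec_get_conflict puzzle goal size (get_conflict puzzle goal size)


-- ===== LEMMAS AND PROOFS =====

-- goal index of the tile at (Nat) position i, none for the blank / a tile not in goal
def pvGN (puzzle : List Int) (goal : List Int) (i : Nat) : Option Nat :=
  let v := puzzle.getD i 0
  if v = 0 ∨ goal.contains v = false then none
  else some ((PySem.List.index? goal v).getD 0)

-- A's pair condition (j later than k on the board; conflict when goal order is reversed)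
def pvCondA (puzzle : List Int) (goal : List Int) (j k : Nat) : Bool :=
  match pvGN puzzle goal j, pvGN puzzle goal k with
  | some gj, some gk => decide (gj < gk)
  | _, _ => false

-- B's symmetric condition
def pvCondB (puzzle : List Int) (goal : List Int) (i m : Nat) : Bool :=
  match pvGN puzzle goal i, pvGN puzzle goal m with
  | some gi, some gm => decide ((m < i ∧ gi < gm) ∨ (i < m ∧ gm < gi))
  | _, _ => false

-- A's loop body for one conflicting pair (Nat-index form)
def pvBump (st : List Int × List (List Int)) (j k : Nat) : List Int × List (List Int) :=
  let c1 := st.1.set j (st.1.getD j 0 + 1)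
  let c2 := c1.set k (c1.getD k 0 + 1)
  let f1 := st.2.set j (st.2.getD j [] ++ [(k : Int)])
  let f2 := f1.set k (f1.getD k [] ++ [(j : Int)])
  (c2, f2)

def pvStep (puzzle : List Int) (goal : List Int) (st : List Int × List (List Int))
    (p : Nat × Nat) : List Int × List (List Int) :=
  if pvCondA puzzle goal p.1 p.2 then pvBump st p.1 p.2 else st

-- the pairs (j,k), k < j < n, in A's traversal order
def pvPairsN (n : Nat) : List (Nat × Nat) :=
  (List.range n).flatMap (fun j => (List.range j).map (fun k => (j, k)))

-- the partners position i picks up from a pair list, in traversal order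
def pvPartners (puzzle : List Int) (goal : List Int) (i : Nat) (L : List (Nat × Nat)) : List Int :=
  L.filterMap (fun p =>
    if pvCondA puzzle goal p.1 p.2 then
      (if p.1 = i then some ((p.2 : Int)) else if p.2 = i then some ((p.1 : Int)) else none)
    else none)

-- B's row at position i (Nat form)
def pvRowN (puzzle : List Int) (goal : List Int) (n i : Nat) : List Int :=
  match pvGN puzzle goal i with
  | none => []
  | some _ => ((List.range n).filter (fun m => pvCondB puzzle goal i m)).map (fun m : Nat => (m : Int))

lemma pvPairsN_mem {n : Nat} {p : Nat × Nat} (hp : p ∈ pvPairsN n) :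
    p.1 < n ∧ p.2 < p.1 := by
  simp only [pvPairsN, List.mem_flatMap, List.mem_map, List.mem_range] at hp
  obtain ⟨j, hj, k, hk, rfl⟩ := hp
  exact ⟨hj, hk⟩

lemma pvPairsN_succ (n : Nat) :
    pvPairsN (n + 1) = pvPairsN n ++ (List.range n).map (fun k => (n, k)) := by
  simp [pvPairsN, List.range_succ]

-- ===== invariant of the pair fold =====
lemma pvFold_spec (puzzle goal : List Int) (L : List (Nat × Nat)) :
    ∀ (st : List Int × List (List Int)),
    (∀ p ∈ L, p.1 < st.1.length ∧ p.2 < st.1.length ∧ p.1 ≠ p.2) →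
    st.2.length = st.1.length →
    (L.foldl (pvStep puzzle goal) st).1.length = st.1.length ∧
    (L.foldl (pvStep puzzle goal) st).2.length = st.1.length ∧
    ∀ i, i < st.1.length →
      (L.foldl (pvStep puzzle goal) st).1.getD i 0
        = st.1.getD i 0 + ((pvPartners puzzle goal i L).length : Int) ∧
      (L.foldl (pvStep puzzle goal) st).2.getD i []
        = st.2.getD i [] ++ pvPartners puzzle goal i L := by
  induction L with
  | nil => intro st _ h; simp [pvPartners, h]
  | cons p L ih =>
    intro st hL hlen
    obtain ⟨hp1, hp2, hpne⟩ := hL p (List.mem_cons_self ..)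
    by_cases hc : pvCondA puzzle goal p.1 p.2
    · -- the pair conflicts: one bump, then the tail
      have hstep : pvStep puzzle goal st p = pvBump st p.1 p.2 := by
        simp [pvStep, hc]
      set st' := pvBump st p.1 p.2 with hst'
      have hlen1 : st'.1.length = st.1.length := by simp [hst', pvBump]
      have hlen2 : st'.2.length = st.1.length := by simp [hst', pvBump, hlen]
      obtain ⟨ih1, ih2, ihval⟩ := ih st' (by rw [hlen1]; exact fun q hq => hL q (List.mem_cons_of_mem _ hq)) (by omega)
      rw [hlen1] at ih1 ih2
      have hget1 : ∀ i, i < st.1.length → st'.1.getD i 0 =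
          st.1.getD i 0 + (if p.1 = i ∨ p.2 = i then 1 else 0) := by
        intro i hilen
        simp only [hst', pvBump, List.getD_eq_getElem?_getD, List.getElem?_set,
          List.length_set]
        by_cases h1 : p.1 = i <;> by_cases h2 : p.2 = i <;>
          simp_all [List.getD_eq_getElem?_getD]
      have hget2 : ∀ i, i < st.1.length → st'.2.getD i [] =
          st.2.getD i [] ++ (if p.1 = i then [(p.2 : Int)] else if p.2 = i then [(p.1 : Int)] else []) := by
        intro i hilen
        have hilen2 : i < st.2.length := by omega
        simp only [hst', pvBump, List.getD_eq_getElem?_getD, List.getElem?_set,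
          List.length_set]
        by_cases h1 : p.1 = i <;> by_cases h2 : p.2 = i <;>
          simp_all [List.getD_eq_getElem?_getD]
      have hpart : ∀ i, pvPartners puzzle goal i (p :: L) =
          (if p.1 = i then [(p.2 : Int)] else if p.2 = i then [(p.1 : Int)] else []) ++
            pvPartners puzzle goal i L := by
        intro i
        simp only [pvPartners, List.filterMap_cons]
        rw [if_pos hc]
        by_cases h1 : p.1 = i
        · simp [h1]
        · by_cases h2 : p.2 = i <;> simp [h1, h2]
      refine ⟨?_, ?_, ?_⟩
      · simpa [hstep] using ih1
      · simpa [hstep] using ih2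
      · intro i hi
        have hi' : i < st'.1.length := by omega
        obtain ⟨v1, v2⟩ := ihval i hi'
        constructor
        · rw [List.foldl_cons, hstep, v1, hget1 i hi, hpart i]
          by_cases h1 : p.1 = i <;> by_cases h2 : p.2 = i <;> simp [h1, h2] <;> ring
        · rw [List.foldl_cons, hstep, v2, hget2 i hi, hpart i, List.append_assoc]
    · -- no conflict: the pair is skipped on both sides
      have hstep : pvStep puzzle goal st p = st := by simp [pvStep, hc]
      obtain ⟨ih1, ih2, ihval⟩ := ih st (fun q hq => hL q (List.mem_cons_of_mem _ hq)) hlen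
      have hpart : ∀ i, pvPartners puzzle goal i (p :: L) = pvPartners puzzle goal i L := by
        intro i; simp [pvPartners, hc]
      exact ⟨by simpa [hstep] using ih1, by simpa [hstep] using ih2,
        fun i hi => by rw [List.foldl_cons, hstep, hpart i]; exact ihval i hi⟩

-- small filterMap helpers
lemma pvFilterMap_guard {α : Type} (l : List Nat) (p : Nat → Bool) (f : Nat → α) :
    l.filterMap (fun k => if p k then some (f k) else none) = (l.filter p).map f := by
  induction l with
  | nil => simp
  | cons x l ih => by_cases h : p x <;> simp [h, ih]

lemma pvFilterMap_single {α : Type} (n i : Nat) (hi : i < n) (g : Nat → Option α)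
    (hg : ∀ k, k ≠ i → g k = none) :
    (List.range n).filterMap g = (g i).toList := by
  induction n with
  | zero => omega
  | succ n ih =>
    rw [List.range_succ, List.filterMap_append]
    by_cases h : i < n
    · rw [ih h]; simp [hg n (by omega)]
    · have : i = n := by omega
      subst this
      have : (List.range i).filterMap g = [] := by
        rw [List.filterMap_eq_nil_iff]
        intro a ha; exact hg a (by simp at ha; omega)
      cases hgi : g i <;> simp [this, hgi]

-- the two conditions agree in the relevant index order
lemma pvCondA_eq_condB_lt (puzzle goal : List Int) {i k : Nat} (hk : k < i) :
    pvCondA puzzle goal i k = pvCondB puzzle goal i k := by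
  simp only [pvCondA, pvCondB]
  cases pvGN puzzle goal i <;> cases pvGN puzzle goal k <;>
    simp [hk, Nat.lt_asymm hk]

lemma pvCondA_eq_condB_gt (puzzle goal : List Int) {i j : Nat} (hj : i < j) :
    pvCondA puzzle goal j i = pvCondB puzzle goal i j := by
  simp only [pvCondA, pvCondB]
  cases pvGN puzzle goal j <;> cases pvGN puzzle goal i <;>
    simp [hj, Nat.lt_asymm hj]

lemma pvCondB_self (puzzle goal : List Int) (i : Nat) :
    pvCondB puzzle goal i i = false := by
  simp only [pvCondB]
  cases pvGN puzzle goal i <;> simp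

-- if position i is invalid it never picks up a partner
lemma pvPartners_of_none (puzzle goal : List Int) (i : Nat) (L : List (Nat × Nat))
    (hG : pvGN puzzle goal i = none) : pvPartners puzzle goal i L = [] := by
  rw [pvPartners, List.filterMap_eq_nil_iff]
  intro p _
  by_cases h1 : p.1 = i
  · subst h1; simp [pvCondA, hG]
  · by_cases h2 : p.2 = i
    · have : pvCondA puzzle goal p.1 p.2 = false := by
        rw [h2]; simp only [pvCondA, hG]; cases pvGN puzzle goal p.1 <;> simp
      simp [this]
    · simp [h1, h2]

-- a pair list whose components all avoid i contributes nothing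
lemma pvPartners_of_avoid (puzzle goal : List Int) (i : Nat) (L : List (Nat × Nat))
    (hL : ∀ p ∈ L, p.1 ≠ i ∧ p.2 ≠ i) : pvPartners puzzle goal i L = [] := by
  rw [pvPartners, List.filterMap_eq_nil_iff]
  intro p hp
  simp [(hL p hp).1, (hL p hp).2]

-- ===== partners of the full triangular pair list = B's row =====
lemma pvPartners_eq_row (puzzle goal : List Int) (n i : Nat) (hi : i < n) :
    pvPartners puzzle goal i (pvPairsN n) = pvRowN puzzle goal n i := by
  cases hG : pvGN puzzle goal i with
  | none => rw [pvPartners_of_none puzzle goal i _ hG]; simp [pvRowN, hG]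
  | some gi =>
    induction n, hi using Nat.le_induction with
    | base =>
      rw [pvPairsN_succ, pvPartners, List.filterMap_append]
      have h0 : pvPartners puzzle goal i (pvPairsN i) = [] := by
        apply pvPartners_of_avoid
        intro p hp
        have := pvPairsN_mem hp
        omega
      rw [pvPartners] at h0
      rw [h0, List.nil_append, List.filterMap_map]
      have hfm : ∀ k : Nat, ((fun p : Nat × Nat =>
          if pvCondA puzzle goal p.1 p.2 then
            (if p.1 = i then some ((p.2 : Int)) else if p.2 = i then some ((p.1 : Int)) else none)
          else none) ∘ (fun k => (i, k))) k
          = if pvCondA puzzle goal i k then some ((k : Int)) else none := by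
        intro k
        simp only [Function.comp]
        split <;> simp
      rw [List.filterMap_congr (fun k _ => hfm k), pvFilterMap_guard]
      rw [pvRowN, hG]
      rw [List.range_succ, List.filter_append]
      have : (List.filter (fun m => pvCondB puzzle goal i m) [i]) = [] := by
        simp [pvCondB_self]
      rw [this, List.append_nil]
      have hfc : List.filter (fun k => pvCondA puzzle goal i k) (List.range i)
          = List.filter (fun m => pvCondB puzzle goal i m) (List.range i) :=
        List.filter_congr (fun k hk => pvCondA_eq_condB_lt puzzle goal (List.mem_range.mp hk))
      rw [hfc]
    | succ n hn ih =>
      rw [pvPairsN_succ, pvPartners, List.filterMap_append]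
      rw [pvPartners] at ih
      rw [ih, List.filterMap_map]
      have hne : n ≠ i := by omega
      have hfm : ∀ k : Nat, ((fun p : Nat × Nat =>
          if pvCondA puzzle goal p.1 p.2 then
            (if p.1 = i then some ((p.2 : Int)) else if p.2 = i then some ((p.1 : Int)) else none)
          else none) ∘ (fun k => (n, k))) k
          = if k = i then (if pvCondA puzzle goal n i then some ((n : Int)) else none) else none := by
        intro k
        simp only [Function.comp]
        by_cases hk : k = i
        · subst hk; split <;> simp
        · rename_i hk; split <;> simp_all
      rw [List.filterMap_congr (fun k _ => hfm k),
        pvFilterMap_single n i hn _ (fun k hk => by simp [hk])]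
      simp only [pvRowN, hG, List.range_succ, List.filter_append]
      rw [List.map_append]
      congr 1
      rw [pvCondA_eq_condB_gt puzzle goal (by omega : i < n)]
      by_cases h : pvCondB puzzle goal i n <;> simp [h]

-- ===== A's port in Nat normal form =====
lemma pvA_normal (puzzle goal : List Int) (size : Int)
    (hn : size.toNat ≤ puzzle.length) :
    get_conflict puzzle goal size
      = (pvPairsN size.toNat).foldl (pvStep puzzle goal)
          (List.replicate size.toNat 0, List.replicate size.toNat []) := by
  simp only [get_conflict]
  -- the conflict initialisation builds n empty rows
  rw [PySem.List.foldl_append_singleton_eq_map, List.nil_append, List.map_const',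
    PySem.List.length_pyRange_one]
  have hzero : size - 0 = size := by ring
  rw [hzero]
  -- the body of A's outer loop, as a function of the Int loop variable
  set bodyA := fun (st : List Int × List (List Int)) (j : Int) =>
    match PySem.List.pyGet? puzzle j with
    | none => st
    | some pj =>
      if pj = 0 ∨ goal.contains pj = false then st
      else
        (PySem.List.pyRange 0 j).foldl (fun st k =>
          match PySem.List.pyGet? puzzle k with
          | none => st
          | some pk =>
            if pk = 0 ∨ goal.contains pk = false then st
            else if ((PySem.List.index? goal pj).getD 0) ≥ ((PySem.List.index? goal pk).getD 0) then st
            else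
              let count1 := PySem.List.pySetD st.1 j (PySem.List.pyGetD st.1 j 0 + 1)
              let count2 := PySem.List.pySetD count1 k (PySem.List.pyGetD count1 k 0 + 1)
              let conf1 := PySem.List.pySetD st.2 j (PySem.List.pyGetD st.2 j [] ++ [k])
              let conf2 := PySem.List.pySetD conf1 k (PySem.List.pyGetD conf1 k [] ++ [j])
              (count2, conf2)) st with hbodyA
  -- step 1: extend the outer loop to start at 0 (the j = 0 block is empty)
  have hbody0 : ∀ st, bodyA st 0 = st := by
    intro st
    simp only [hbodyA]
    cases PySem.List.pyGet? puzzle 0 with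
    | none => rfl
    | some pj =>
      simp only []
      split
      · rfl
      · rw [PySem.List.pyRange_one_eq_nil (by omega)]; rfl
  have hext : (PySem.List.pyRange 1 size).foldl bodyA
        (List.replicate size.toNat 0, List.replicate size.toNat ([] : List Int))
      = (PySem.List.pyRange 0 size).foldl bodyA
        (List.replicate size.toNat 0, List.replicate size.toNat ([] : List Int)) := by
    by_cases hs : size ≤ 0
    · rw [PySem.List.pyRange_one_eq_nil (by omega), PySem.List.pyRange_one_eq_nil (by omega)]
    · rw [PySem.List.pyRange_one_cons (by omega : (0 : Int) < size), List.foldl_cons, hbody0]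
      norm_num
  rw [hext]
  -- step 2: Nat-ify the outer range
  have hcast : PySem.List.pyRange 0 size = (List.range size.toNat).map (fun k : Nat => (k : Int)) := by
    by_cases hs : size ≤ 0
    · rw [PySem.List.pyRange_one_eq_nil (by omega)]
      have : size.toNat = 0 := by omega
      rw [this]; rfl
    · conv_lhs => rw [show size = ((size.toNat : Nat) : Int) by omega]
      rw [PySem.List.pyRange_zero_nat]
  rw [hcast, List.foldl_map]
  -- step 3: each outer-body application equals the fold of pvStep over its pair block
  have hblock : ∀ (st : List Int × List (List Int)) (j : Nat), j < size.toNat →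
      bodyA st (j : Int)
        = ((List.range j).map (fun k => (j, k))).foldl (pvStep puzzle goal) st := by
    intro st j hj
    have hjlen : j < puzzle.length := lt_of_lt_of_le hj hn
    have hvj : puzzle.getD j 0 = puzzle[j] := by
      rw [List.getD_eq_getElem?_getD, List.getElem?_eq_getElem hjlen]; rfl
    simp only [hbodyA]
    simp only [PySem.List.pyGet?_natCast, List.getElem?_eq_getElem hjlen]
    by_cases hvalj : puzzle[j] = 0 ∨ goal.contains puzzle[j] = false
    · -- row j is invalid: A skips the block, every pvStep in it is the identity
      have hGj : pvGN puzzle goal j = none := by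
        rw [pvGN]; simp only [hvj]; rw [if_pos hvalj]
      rw [if_pos hvalj, List.foldl_map]
      rw [PySem.List.foldl_congr_mem _ _ (fun st _ => st) st
        (fun acc k _ => by simp [pvStep, pvCondA, hGj]), List.foldl_fixed]
    · have hGj : pvGN puzzle goal j = some ((PySem.List.index? goal puzzle[j]).getD 0) := by
        rw [pvGN]; simp only [hvj]; rw [if_neg hvalj]
      rw [if_neg hvalj]
      -- Nat-ify the inner range
      have hjcast : PySem.List.pyRange 0 (j : Int) = (List.range j).map (fun k : Nat => (k : Int)) :=
        PySem.List.pyRange_zero_nat j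
      rw [hjcast, List.foldl_map, List.foldl_map]
      apply PySem.List.foldl_congr_mem
      intro acc k hk
      have hklen : k < puzzle.length := lt_of_lt_of_le (lt_of_lt_of_le (List.mem_range.mp hk) hj.le) hn
      have hvk : puzzle.getD k 0 = puzzle[k] := by
        rw [List.getD_eq_getElem?_getD, List.getElem?_eq_getElem hklen]; rfl
      simp only [PySem.List.pyGet?_natCast, List.getElem?_eq_getElem hklen]
      by_cases hvalk : puzzle[k] = 0 ∨ goal.contains puzzle[k] = false
      · have hGk : pvGN puzzle goal k = none := by
          rw [pvGN]; simp only [hvk]; rw [if_pos hvalk]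
        rw [if_pos hvalk]
        simp [pvStep, pvCondA, hGk, hGj]
      · have hGk : pvGN puzzle goal k = some ((PySem.List.index? goal puzzle[k]).getD 0) := by
          rw [pvGN]; simp only [hvk]; rw [if_neg hvalk]
        rw [if_neg hvalk]
        by_cases hge : ((PySem.List.index? goal puzzle[j]).getD 0) ≥ ((PySem.List.index? goal puzzle[k]).getD 0)
        · rw [if_pos hge]
          have : pvCondA puzzle goal j k = false := by
            simp only [PySem.List.index?_eq_idxOf?] at hge
            simp [pvCondA, hGj, hGk]; omega
          simp [pvStep, this]
        · rw [if_neg hge]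
          have hcond : pvCondA puzzle goal j k = true := by
            simp only [PySem.List.index?_eq_idxOf?] at hge
            simp [pvCondA, hGj, hGk]; omega
          simp only [pvStep, hcond, if_pos]
          simp only [pvBump, PySem.List.pySetD_natCast, PySem.List.pyGetD_natCast]
  rw [PySem.List.foldl_congr_mem _ _
      (fun st j => ((List.range j).map (fun k => (j, k))).foldl (pvStep puzzle goal) st) _
      (fun acc j hj => hblock acc j (List.mem_range.mp hj))]
  rw [pvPairsN, ← List.foldl_flatMap]

-- pvGB agrees with the Nat-index goal lookup on in-range positions
lemma pvGB_eq_pvGN (puzzle goal : List Int) (i : Nat) (h : i < puzzle.length) :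
    pvGB puzzle goal (i : Int) = pvGN puzzle goal i := by
  have hv : puzzle.getD i 0 = puzzle[i] := by
    rw [List.getD_eq_getElem?_getD, List.getElem?_eq_getElem h]; rfl
  unfold pvGB pvGN
  rw [PySem.List.pyGet?_natCast, List.getElem?_eq_getElem h, hv]
  show (if puzzle[i] = 0 ∨ goal.contains puzzle[i] = false then none
        else PySem.List.index? goal puzzle[i])
      = (if puzzle[i] = 0 ∨ goal.contains puzzle[i] = false then none
        else some ((PySem.List.index? goal puzzle[i]).getD 0))
  by_cases hval : puzzle[i] = 0 ∨ goal.contains puzzle[i] = false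
  · rw [if_pos hval, if_pos hval]
  · rw [if_neg hval, if_neg hval]
    have h2 : goal.contains puzzle[i] = true := by
      rcases not_or.mp hval with ⟨_, h2⟩
      revert h2; cases goal.contains puzzle[i] <;> simp
    have hmem : puzzle[i] ∈ goal := by simpa using h2
    have hsome := (PySem.List.index?_isSome_iff goal puzzle[i]).mpr hmem
    cases hx : PySem.List.index? goal puzzle[i] with
    | none => rw [hx] at hsome; simp at hsome
    | some v => simp

-- ===== B's port in Nat normal form =====
lemma pvB_normal (puzzle goal : List Int) (size : Int)
    (hn : size.toNat ≤ puzzle.length) :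
    get_conflict_alt puzzle goal size
      = (((List.range size.toNat).map (pvRowN puzzle goal size.toNat)).map
           (fun row => ((row.length : Nat) : Int)),
         (List.range size.toNat).map (pvRowN puzzle goal size.toNat)) := by
  have hmax : (max size 0).toNat = size.toNat := by omega
  simp only [get_conflict_alt]
  rw [hmax]
  have hrows : (List.range size.toNat).map (fun i : Nat =>
      match pvGB puzzle goal (i : Int) with
      | none => ([] : List Int)
      | some gi =>
        ((List.range size.toNat).filter (fun m : Nat =>
          match pvGB puzzle goal (m : Int) with
          | none => false
          | some gm => decide ((m < i ∧ gi < gm) ∨ (i < m ∧ gm < gi)))).map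
          (fun m : Nat => (m : Int)))
      = (List.range size.toNat).map (pvRowN puzzle goal size.toNat) := by
    apply List.map_congr_left
    intro i hi
    have hilen : i < puzzle.length := lt_of_lt_of_le (List.mem_range.mp hi) hn
    rw [pvGB_eq_pvGN puzzle goal i hilen, pvRowN]
    cases hG : pvGN puzzle goal i with
    | none => rfl
    | some gi =>
      have hfilter : ∀ m ∈ List.range size.toNat,
          (match pvGB puzzle goal (m : Int) with
           | none => false
           | some gm => decide ((m < i ∧ gi < gm) ∨ (i < m ∧ gm < gi)))
          = pvCondB puzzle goal i m := by
        intro m hm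
        have hmlen : m < puzzle.length := lt_of_lt_of_le (List.mem_range.mp hm) hn
        rw [pvGB_eq_pvGN puzzle goal m hmlen, pvCondB, hG]
        cases pvGN puzzle goal m <;> rfl
      exact congrArg (List.map (fun m : Nat => (m : Int))) (List.filter_congr hfilter)
  rw [hrows]

-- ===== VERDICT (by name: the statement is the Claim_ definition above) =====
theorem get_conflict_spec : Claim_equal_get_conflict := by
  intro puzzle goal size _ hpre
  unfold Spec_get_conflict
  have hn : size.toNat ≤ puzzle.length := by
    rcases hpre with h | h <;> omega
  rw [pvA_normal puzzle goal size hn, pvB_normal puzzle goal size hn]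
  set n := size.toNat with hn'
  have hmem : ∀ p ∈ pvPairsN n, p.1 < (List.replicate n (0 : Int)).length ∧
      p.2 < (List.replicate n (0 : Int)).length ∧ p.1 ≠ p.2 := by
    intro p hp
    have := pvPairsN_mem hp
    simp only [List.length_replicate]
    omega
  obtain ⟨hl1, hl2, hval⟩ := pvFold_spec puzzle goal (pvPairsN n)
      (List.replicate n 0, List.replicate n []) hmem (by simp)
  simp only [List.length_replicate] at hl1 hl2 hval
  refine Prod.ext ?_ ?_
  · apply List.ext_getElem (by simp [hl1])
    intro i h1 h2
    have hi : i < n := by simpa [hl1] using h1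
    have hv := (hval i (by simpa using hi)).1
    rw [pvPartners_eq_row puzzle goal n i hi] at hv
    have hvl : (List.foldl (pvStep puzzle goal) (List.replicate n 0, List.replicate n []) (pvPairsN n)).1.getD i 0
        = (List.foldl (pvStep puzzle goal) (List.replicate n 0, List.replicate n []) (pvPairsN n)).1[i] := by
      rw [List.getD_eq_getElem?_getD, List.getElem?_eq_getElem h1]; rfl
    rw [hvl] at hv
    rw [hv]
    simp [List.getElem_map, List.getElem_range]
  · apply List.ext_getElem (by simp [hl2])
    intro i h1 h2
    have hi : i < n := by simpa [hl2] using h1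
    have hv := (hval i (by simpa using hi)).2
    rw [pvPartners_eq_row puzzle goal n i hi] at hv
    have hvl : (List.foldl (pvStep puzzle goal) (List.replicate n 0, List.replicate n []) (pvPairsN n)).2.getD i []
        = (List.foldl (pvStep puzzle goal) (List.replicate n 0, List.replicate n []) (pvPairsN n)).2[i] := by
      rw [List.getD_eq_getElem?_getD, List.getElem?_eq_getElem h1]; rfl
    rw [hvl] at hv
    rw [hv]
    simp [List.getElem_map, List.getElem_range]
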